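-- pv_equiv track=rewrite | github.com/sunilsoni/interview-notes-python | com/interview/2024/May/findNumOfPairs2.py | findNumOfPairs2
-- ===== SOURCE A (Python) =====
-- def findNumOfPairs2(a, b):
--     a.sort()
--     b.sort()
--     count = 0
--     i = j = 0
--     while i < len(a) and j < len(b):
--         if a[i] < b[j]:
--             count += 1
--             i += 1
--             j += 1
--         else:
--             j += 1
--     return count
-- ===== SOURCE B (Python) =====
-- def findNumOfPairs2(a, b):
--     a.sort()
--     b.sort()
--
--     def feasible(k):
--         # the k smallest a's can be matched iff a[i] < b[len(b)-k+i] for all i < k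
--         return all(x < y for x, y in zip(a[:k], b[len(b) - k:]))
--
--     lo, hi = 0, min(len(a), len(b))
--     while lo < hi:
--         mid = (lo + hi + 1) // 2
--         if feasible(mid):
--             lo = mid
--         else:
--             hi = mid - 1
--     return lo
-- ===== Notes on version B (the rewrite author's own statement) =====
-- stated objective: alternative
-- what changed: B replaces A's two-pointer greedy sweep by a binary search on the answer k, with an O(n) feasibility check that matches the k smallest a's positionally against the k largest b's; correctness rests on a Hall-type characterisation of the maximum matching size, proved in Lean.
import Mathlib
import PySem

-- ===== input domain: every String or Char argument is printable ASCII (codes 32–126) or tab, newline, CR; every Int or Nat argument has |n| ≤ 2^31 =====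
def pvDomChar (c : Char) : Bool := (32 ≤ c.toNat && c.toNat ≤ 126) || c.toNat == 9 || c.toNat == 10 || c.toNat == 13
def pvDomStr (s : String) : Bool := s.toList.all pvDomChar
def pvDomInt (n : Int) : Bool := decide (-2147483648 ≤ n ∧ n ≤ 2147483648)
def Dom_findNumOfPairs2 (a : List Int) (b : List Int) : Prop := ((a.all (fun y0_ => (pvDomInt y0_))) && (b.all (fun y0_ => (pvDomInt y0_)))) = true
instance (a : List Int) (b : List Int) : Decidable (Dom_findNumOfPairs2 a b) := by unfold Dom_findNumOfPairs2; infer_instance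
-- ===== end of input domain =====

-- B replaces A's two-pointer greedy sweep by a binary search on the answer with a positional
-- feasibility check; objective: alternative (same asymptotic cost).
-- Both Pythons sort a and b IN PLACE; the equivalence proved here is about the return value.

-- ===== PORT A =====
-- A's while loop over indices i, j (both start at 0 and only increase, so Nat indices);
-- the guard ensures both indices are in range, so getD is exact. The loop increments j on
-- every pass, so len(b) iterations suffice: fuel = len(b) is a pure totality bound, never hit.
def goA (sa sb : List Int) : Nat → Nat → Nat → Int → Int
  | 0, _i, _j, count => count
  | fuel + 1, i, j, count =>
    if i < sa.length ∧ j < sb.length then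
      if sa.getD i 0 < sb.getD j 0 then goA sa sb fuel (i + 1) (j + 1) (count + 1)
      else goA sa sb fuel i (j + 1) count
    else count

def findNumOfPairs2 (a : List Int) (b : List Int) : Int :=
  let sa := PySem.List.sorted a (fun x => x) false
  let sb := PySem.List.sorted b (fun x => x) false
  goA sa sb sb.length 0 0 0

-- ===== PORT B =====
-- Source B's inner function feasible(k): all(x < y for x, y in zip(a[:k], b[len(b)-k:])).
-- a[:k] is take k, b[len(b)-k:] is drop (len b - k) (binary search only calls it with
-- 0 ≤ k ≤ min of the lengths, where Python's slice bounds clamp exactly like take/drop).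
def feasB (sa sb : List Int) (k : Nat) : Bool :=
  ((sa.take k).zip (sb.drop (sb.length - k))).all (fun p => p.1 < p.2)

-- Source B's while loop: lo, hi stay in [0, min(len a, len b)] and hi - lo shrinks every pass,
-- so fuel = the initial hi - lo = min(len a, len b) is a pure totality bound, never hit;
-- mid = (lo+hi+1)/2 on Nat is exact for Python's // on these nonnegative values.
def bsB (sa sb : List Int) : Nat → Nat → Nat → Nat
  | 0, lo, _hi => lo
  | fuel + 1, lo, hi =>
    if lo < hi then
      if feasB sa sb ((lo + hi + 1) / 2) then bsB sa sb fuel ((lo + hi + 1) / 2) hi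
      else bsB sa sb fuel lo ((lo + hi + 1) / 2 - 1)
    else lo

def findNumOfPairs2_alt (a : List Int) (b : List Int) : Int :=
  let sa := PySem.List.sorted a (fun x => x) false
  let sb := PySem.List.sorted b (fun x => x) false
  ((bsB sa sb (min sa.length sb.length) 0 (min sa.length sb.length) : Nat) : Int)

-- ===== PRECONDITION & SPEC =====
def Spec_findNumOfPairs2 (a : List Int) (b : List Int) (out : Int) : Prop := out = findNumOfPairs2_alt a b
instance (a : List Int) (b : List Int) (out : Int) : Decidable (Spec_findNumOfPairs2 a b out) := by unfold Spec_findNumOfPairs2; infer_instance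

-- ===== CLAIM (what is proved, stated in full; the proofs are below) =====
def Claim_equal_findNumOfPairs2 : Prop := ∀ (a : List Int) (b : List Int), Dom_findNumOfPairs2 a b → Spec_findNumOfPairs2 a b (findNumOfPairs2 a b)

-- ===== LEMMAS AND PROOFS =====

-- A's loop as a peel over the two sorted lists (bottom-up greedy).
def fA : List Int → List Int → Int
  | _, [] => 0
  | [], _ :: _ => 0
  | x :: xs, y :: ys => if x < y then 1 + fA xs ys else fA (x :: xs) ys
termination_by a b => a.length + b.length

-- Maximum order-preserving matching (pairs a-element < b-element): the common characterisation.
def M : List Int → List Int → Int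
  | [], _ => 0
  | _ :: _, [] => 0
  | x :: xs, y :: ys =>
      max (M xs (y :: ys)) (max (M (x :: xs) ys) (if x < y then 1 + M xs ys else 0))
termination_by a b => a.length + b.length

theorem fA_nil_right (a : List Int) : fA a [] = 0 := by cases a <;> simp [fA]
theorem fA_nil_left (b : List Int) : fA [] b = 0 := by cases b <;> simp [fA]
theorem fA_cons_cons (x y : Int) (xs ys : List Int) :
    fA (x :: xs) (y :: ys) = if x < y then 1 + fA xs ys else fA (x :: xs) ys := by simp [fA]
theorem M_nil_left (b : List Int) : M [] b = 0 := by simp [M]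
theorem M_nil_right (a : List Int) : M a [] = 0 := by cases a <;> simp [M]
theorem M_cons_cons (x y : Int) (xs ys : List Int) :
    M (x :: xs) (y :: ys) =
      max (M xs (y :: ys)) (max (M (x :: xs) ys) (if x < y then 1 + M xs ys else 0)) := by
  simp [M]

theorem M_nonneg (a b : List Int) : 0 ≤ M a b := by
  fun_induction M a b with
  | case1 => simp
  | case2 => simp
  | case3 x xs y ys ih1 ih2 ih3 => split_ifs <;> omega

theorem M_mono_a (x : Int) (a b : List Int) : M a b ≤ M (x :: a) b := by
  cases b with
  | nil => simp [M_nil_right]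
  | cons y ys => rw [M_cons_cons]; omega

theorem M_mono_b (y : Int) (a b : List Int) : M a b ≤ M a (y :: b) := by
  cases a with
  | nil => simp [M_nil_left]
  | cons x xs => rw [M_cons_cons]; omega

theorem M_drop_a (x : Int) (a b : List Int) : M (x :: a) b ≤ 1 + M a b := by
  induction b with
  | nil => have := M_nonneg a []; simp only [M_nil_right]; omega
  | cons y ys ih =>
      rw [M_cons_cons]
      have h1 := M_mono_b y a ys
      have h2 := M_nonneg a (y :: ys)
      split_ifs <;> omega

theorem M_drop_b (y : Int) (a b : List Int) : M a (y :: b) ≤ 1 + M a b := by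
  induction a with
  | nil => have := M_nonneg ([] : List Int) b; simp only [M_nil_left]; omega
  | cons x xs ih =>
      rw [M_cons_cons]
      have h1 := M_mono_a x xs b
      have h2 := M_nonneg (x :: xs) b
      split_ifs <;> omega

-- A b-element no larger than every a-element can never be matched.
theorem M_useless_b (y : Int) (a b : List Int) (h : ∀ z ∈ a, y ≤ z) : M a (y :: b) = M a b := by
  induction a with
  | nil => simp [M_nil_left]
  | cons x xs ih =>
      have hx : y ≤ x := h x (by simp)
      have hxs : M xs (y :: b) = M xs b := ih (fun z hz => h z (by simp [hz]))
      have h1 := M_mono_a x xs b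
      have h2 := M_nonneg (x :: xs) b
      rw [M_cons_cons]
      have hlt : ¬ x < y := by omega
      rw [if_neg hlt, hxs]
      omega

-- Bottom-up greedy is optimal on ascending lists.
theorem fA_eq_M : ∀ (b a : List Int), a.Pairwise (· ≤ ·) → b.Pairwise (· ≤ ·) →
    fA a b = M a b := by
  intro b
  induction b with
  | nil => intro a _ _; rw [fA_nil_right, M_nil_right]
  | cons y ys ih =>
      intro a ha hb
      cases a with
      | nil => rw [fA_nil_left, M_nil_left]
      | cons x xs =>
          rw [fA_cons_cons, M_cons_cons]
          by_cases hxy : x < y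
          · have h1 := M_drop_b y xs ys
            have h2 := M_drop_a x xs ys
            have he := ih xs (List.Pairwise.sublist (List.sublist_cons_self x xs) ha) hb.tail
            rw [if_pos hxy, if_pos hxy, he]
            omega
          · have hall : ∀ z ∈ (x :: xs), y ≤ z := by
              intro z hz
              rcases List.mem_cons.mp hz with rfl | hz
              · omega
              · have := (List.pairwise_cons.mp ha).1 z hz; omega
            have hu := M_useless_b y (x :: xs) ys hall
            have he := ih (x :: xs) ha hb.tail
            rw [M_cons_cons, if_neg hxy] at hu
            rw [if_neg hxy, if_neg hxy, he]
            omega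

-- M never exceeds either length.
theorem M_le_lengths (a b : List Int) : M a b ≤ (a.length : Int) ∧ M a b ≤ (b.length : Int) := by
  fun_induction M a b with
  | case1 b => simp
  | case2 x xs => simp; positivity
  | case3 x xs y ys ih1 ih2 ih3 =>
      simp only [List.length_cons] at *
      push_cast at *
      split_ifs with h <;> constructor <;> simp only [max_le_iff] <;> omega

-- M is monotone under sublists, in each argument.
theorem M_sublist_left {xs xs' : List Int} (h : xs.Sublist xs') : ∀ b, M xs b ≤ M xs' b := by
  induction h with
  | slnil => intro b; exact le_refl _
  | cons x h ih => intro b; exact le_trans (ih b) (M_mono_a x _ b)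
  | cons₂ x _ ih =>
      intro b
      induction b with
      | nil => simp [M_nil_right]
      | cons y ys ihb =>
          rw [M_cons_cons, M_cons_cons]
          refine max_le_max (ih _) (max_le_max ihb ?_)
          have := ih ys
          split_ifs <;> omega

theorem M_sublist_right {ys ys' : List Int} (h : ys.Sublist ys') : ∀ a, M a ys ≤ M a ys' := by
  induction h with
  | slnil => intro a; exact le_refl _
  | cons y h ih => intro a; exact le_trans (ih a) (M_mono_b y a _)
  | cons₂ y _ ih =>
      intro a
      induction a with
      | nil => simp [M_nil_left]
      | cons x xs iha =>
          rw [M_cons_cons, M_cons_cons]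
          refine max_le_max iha (max_le_max (ih _) ?_)
          have := ih xs
          split_ifs <;> omega

-- Pointwise-dominated equal-length lists admit a full matching.
theorem M_ge_pointwise : ∀ (xs ys : List Int), xs.length = ys.length →
    (xs.zip ys).all (fun p => p.1 < p.2) = true → (xs.length : Int) ≤ M xs ys := by
  intro xs
  induction xs with
  | nil => intro ys _ _; simp [M_nil_left]
  | cons x xs ih =>
      intro ys hl hp
      cases ys with
      | nil => simp at hl
      | cons y ys =>
          rw [List.zip_cons_cons, List.all_cons, Bool.and_eq_true] at hp
          have h0 : x < y := by simpa using hp.1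
          have hrec : (xs.length : Int) ≤ M xs ys :=
            ih ys (by simpa using hl) hp.2
          rw [M_cons_cons, if_pos h0]
          have : (xs.length : Int) + 1 ≤ 1 + M xs ys := by omega
          calc ((x :: xs).length : Int) = (xs.length : Int) + 1 := by simp
            _ ≤ 1 + M xs ys := this
            _ ≤ _ := le_max_of_le_right (le_max_right _ _)

-- Dropping a prefix costs at most its length.
theorem M_append_left (xs ys b : List Int) : M (xs ++ ys) b ≤ (xs.length : Int) + M ys b := by
  induction xs with
  | nil => simp
  | cons x xs ih =>
      have := M_drop_a x (xs ++ ys) b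
      simp only [List.cons_append, List.length_cons]
      push_cast
      omega

-- If every element of a is at least v, the matching is bounded by the b's above v.
theorem M_le_countP (v : Int) (a b : List Int) (h : ∀ z ∈ a, v ≤ z) :
    M a b ≤ ((b.countP (fun y => decide (v < y))) : Int) := by
  induction b with
  | nil => simp [M_nil_right]
  | cons y ys ih =>
      by_cases hy : v < y
      · have := M_drop_b y a ys
        rw [List.countP_cons]
        simp only [hy, decide_true]
        push_cast
        omega
      · have := M_useless_b y a ys (fun z hz => le_trans (by omega) (h z hz))
        rw [List.countP_cons]
        simp only [hy, decide_false]
        omega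

-- Feasibility (the check of Source B) implies k is attainable.
theorem feas_le_M (sa sb : List Int) (k : Nat) (hka : k ≤ sa.length) (hkb : k ≤ sb.length)
    (hf : feasB sa sb k = true) : (k : Int) ≤ M sa sb := by
  set xs := sa.take k with hxs
  set ys := sb.drop (sb.length - k) with hys
  have hlx : xs.length = k := by simp [hxs]; omega
  have hly : ys.length = k := by simp [hys]; omega
  have h1 : (k : Int) ≤ M xs ys := by
    have := M_ge_pointwise xs ys (by omega) (by rw [feasB] at hf; exact hf)
    rwa [hlx] at this
  have h2 : M xs ys ≤ M sa ys := M_sublist_left (List.take_sublist k sa) ys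
  have h3 : M sa ys ≤ M sa sb := M_sublist_right (List.drop_sublist _ sb) sa
  omega

-- Infeasibility (on sorted lists) bounds the matching below k.
theorem not_feas_M_lt (sa sb : List Int) (k : Nat) (hka : k ≤ sa.length) (hkb : k ≤ sb.length)
    (hsa : sa.Pairwise (· ≤ ·)) (hsb : sb.Pairwise (· ≤ ·))
    (hf : feasB sa sb k = false) : M sa sb < (k : Int) := by
  have : ∃ i, i < k ∧ ¬ (sa.getD i 0 < sb.getD (sb.length - k + i) 0) := by
    rw [feasB] at hf
    rcases List.all_eq_false.mp hf with ⟨p, hpmem, hnp⟩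
    obtain ⟨i, hi, hpi⟩ := List.mem_iff_getElem.mp hpmem
    have hzl : ((sa.take k).zip (sb.drop (sb.length - k))).length = k := by
      simp; omega
    rw [hzl] at hi
    have hia : i < sa.length := by omega
    have hjb : sb.length - k + i < sb.length := by omega
    refine ⟨i, hi, ?_⟩
    have hgz : ((sa.take k).zip (sb.drop (sb.length - k)))[i]'(by omega)
        = (sa[i]'hia, sb[sb.length - k + i]'hjb) := by
      rw [List.getElem_zip]
      congr 1
      · simp [List.getElem_take]
      · simp [List.getElem_drop]
    rw [hgz] at hpi
    have : ¬ (sa[i]'hia < sb[sb.length - k + i]'hjb) := by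
      rw [← hpi] at hnp
      simpa using hnp
    rw [List.getD_eq_getElem _ _ hia, List.getD_eq_getElem _ _ hjb]
    exact this
  obtain ⟨i, hik, hge⟩ := this
  have hia : i < sa.length := by omega
  set j := sb.length - k + i with hj
  have hjb : j < sb.length := by omega
  set v := sa.getD i 0 with hv
  have hbv : sb.getD j 0 ≤ v := by omega
  -- split sa at i
  have hsplit : sa = sa.take i ++ sa.drop i := (List.take_append_drop i sa).symm
  have hdropall : ∀ z ∈ sa.drop i, v ≤ z := by
    intro z hz
    obtain ⟨l, hl, hzl⟩ := List.mem_iff_getElem.mp hz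
    have hlen : (sa.drop i).length = sa.length - i := by simp
    have hgl : (sa.drop i)[l] = sa[i + l]'(by omega) := by
      simp [List.getElem_drop]
    have hmono : sa[i]'hia ≤ sa[i + l]'(by omega) := by
      rcases Nat.eq_or_lt_of_le (Nat.le_add_right i l) with he | hlt
      · simp [← he]
      · exact (List.pairwise_iff_getElem.mp hsa) i (i + l) hia (by omega) hlt
    rw [← hzl, hgl]
    calc v = sa[i]'hia := by rw [hv, List.getD_eq_getElem _ _ hia]
      _ ≤ _ := hmono
  have h1 : M sa sb ≤ ((sa.take i).length : Int) + M (sa.drop i) sb := by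
    conv_lhs => rw [hsplit]
    exact M_append_left _ _ _
  have h2 : M (sa.drop i) sb ≤ ((sb.countP (fun y => decide (v < y))) : Int) :=
    M_le_countP v _ sb hdropall
  -- count of b's above v is at most k - i - 1
  have hcount : sb.countP (fun y => decide (v < y)) ≤ k - i - 1 := by
    have hbsplit : sb = sb.take (j + 1) ++ sb.drop (j + 1) := (List.take_append_drop (j + 1) sb).symm
    have htake0 : (sb.take (j + 1)).countP (fun y => decide (v < y)) = 0 := by
      rw [List.countP_eq_zero]
      intro z hz
      obtain ⟨l, hl, hzl⟩ := List.mem_iff_getElem.mp hz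
      have hlen : (sb.take (j + 1)).length = min (j + 1) sb.length := by simp
      have hlj : l ≤ j := by omega
      have hlb : l < sb.length := by omega
      have hgl : (sb.take (j + 1))[l] = sb[l]'hlb := by simp [List.getElem_take]
      have hmono : sb[l]'hlb ≤ sb[j]'hjb := by
        rcases Nat.eq_or_lt_of_le hlj with he | hlt
        · simp [he]
        · exact (List.pairwise_iff_getElem.mp hsb) l j hlb hjb hlt
      have hzv : z ≤ v := by
        rw [← hzl, hgl]
        calc sb[l]'hlb ≤ sb[j]'hjb := hmono
          _ = sb.getD j 0 := by rw [List.getD_eq_getElem _ _ hjb]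
          _ ≤ v := hbv
      simpa using not_lt.mpr hzv
    have hdle : (sb.drop (j + 1)).countP (fun y => decide (v < y)) ≤ sb.length - (j + 1) := by
      calc _ ≤ (sb.drop (j + 1)).length := List.countP_le_length
        _ = sb.length - (j + 1) := by simp
    conv_lhs => rw [hbsplit]
    rw [List.countP_append, htake0]
    omega
  have hti : (sa.take i).length = i := by simp; omega
  rw [hti] at h1
  have : (sb.countP (fun y => decide (v < y)) : Int) ≤ (k : Int) - i - 1 := by
    have hk1 : 1 ≤ k := by omega
    omega
  omega

-- So, for k ≤ min of the lengths, feasibility is exactly k ≤ M.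
theorem feas_iff (sa sb : List Int) (hsa : sa.Pairwise (· ≤ ·)) (hsb : sb.Pairwise (· ≤ ·))
    (k : Nat) (hk : k ≤ min sa.length sb.length) :
    (feasB sa sb k = true ↔ (k : Int) ≤ M sa sb) := by
  constructor
  · intro hf; exact feas_le_M sa sb k (by omega) (by omega) hf
  · intro hM
    by_contra hc
    have hf : feasB sa sb k = false := by
      cases hfe : feasB sa sb k
      · rfl
      · exact absurd hfe hc
    have := not_feas_M_lt sa sb k (by omega) (by omega) hsa hsb hf
    omega

-- The binary search of Source B finds the unique m with (feasB k ↔ k ≤ m) on [0, hi].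
theorem bs_eq (sa sb : List Int) (m : Nat) :
    ∀ fuel lo hi, hi - lo ≤ fuel → lo ≤ m → m ≤ hi →
      (∀ k, k ≤ hi → (feasB sa sb k = true ↔ k ≤ m)) → bsB sa sb fuel lo hi = m := by
  intro fuel
  induction fuel with
  | zero =>
      intro lo hi hn hlo hhi _
      rw [bsB]
      omega
  | succ n ih =>
      intro lo hi hn hlo hhi hfeas
      rw [bsB]
      by_cases hlt : lo < hi
      · rw [if_pos hlt]
        have hrange : lo < (lo + hi + 1) / 2 ∧ (lo + hi + 1) / 2 ≤ hi := by constructor <;> omega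
        by_cases hm : (lo + hi + 1) / 2 ≤ m
        · rw [if_pos ((hfeas _ hrange.2).mpr hm)]
          exact ih _ hi (by omega) hm hhi hfeas
        · have hff : feasB sa sb ((lo + hi + 1) / 2) = false := by
            cases hfe : feasB sa sb ((lo + hi + 1) / 2)
            · rfl
            · exact absurd ((hfeas _ hrange.2).mp hfe) hm
          rw [hff]
          simp only [Bool.false_eq_true, if_false]
          exact ih lo _ (by omega) hlo (by omega)
            (fun k hk => hfeas k (by omega))
      · rw [if_neg hlt]; omega

-- A's indexed loop equals the peel fA on the remaining suffixes (fuel covers the loop).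
theorem goA_eq (sa sb : List Int) :
    ∀ (fuel j i : Nat) (c : Int), sb.length - j ≤ fuel →
      goA sa sb fuel i j c = c + fA (sa.drop i) (sb.drop j) := by
  intro fuel
  induction fuel with
  | zero =>
      intro j i c hn
      rw [goA]
      have hj : sb.length ≤ j := by omega
      rw [List.drop_eq_nil_of_le hj, fA_nil_right]
      omega
  | succ n ih =>
      intro j i c hn
      rw [goA]
      by_cases hg : i < sa.length ∧ j < sb.length
      · obtain ⟨hi, hj⟩ := hg
        have ea : sa.drop i = sa[i] :: sa.drop (i + 1) := List.drop_eq_getElem_cons hi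
        have eb : sb.drop j = sb[j] :: sb.drop (j + 1) := List.drop_eq_getElem_cons hj
        have ga : sa.getD i 0 = sa[i] := List.getD_eq_getElem sa 0 hi
        have gb : sb.getD j 0 = sb[j] := List.getD_eq_getElem sb 0 hj
        rw [if_pos ⟨hi, hj⟩, ga, gb, ea, eb, fA_cons_cons]
        by_cases hlt : sa[i] < sb[j]
        · rw [if_pos hlt, if_pos hlt, ih (j + 1) (i + 1) (c + 1) (by omega)]
          omega
        · rw [if_neg hlt, if_neg hlt, ih (j + 1) i c (by omega), ea]
      · rw [if_neg hg]
        rcases (by omega : sa.length ≤ i ∨ sb.length ≤ j) with h | h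
        · rw [List.drop_eq_nil_of_le h, fA_nil_left]; omega
        · rw [List.drop_eq_nil_of_le h, fA_nil_right]; omega

-- ===== VERDICT (by name: the statement is the Claim_ definition above) =====
theorem findNumOfPairs2_spec : Claim_equal_findNumOfPairs2 := by
  intro a b _
  unfold Spec_findNumOfPairs2 findNumOfPairs2 findNumOfPairs2_alt
  set sa := PySem.List.sorted a (fun x => x) false with hsa
  set sb := PySem.List.sorted b (fun x => x) false with hsb
  have hsa' : sa.Pairwise (· ≤ ·) := by
    have := PySem.List.sorted_pairwise a (fun x => x)
    simpa [hsa] using this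
  have hsb' : sb.Pairwise (· ≤ ·) := by
    have := PySem.List.sorted_pairwise b (fun x => x)
    simpa [hsb] using this
  have hA : goA sa sb sb.length 0 0 0 = M sa sb := by
    have h1 := goA_eq sa sb sb.length 0 0 0 (by omega)
    simpa [fA_eq_M sb sa hsa' hsb'] using h1
  have hMn := M_nonneg sa sb
  have hMl := M_le_lengths sa sb
  set m := (M sa sb).toNat with hm
  have hmmin : m ≤ min sa.length sb.length := by
    simp only [Nat.le_min]
    omega
  have hB : bsB sa sb (min sa.length sb.length) 0 (min sa.length sb.length) = m := by
    apply bs_eq sa sb m (min sa.length sb.length) 0 (min sa.length sb.length)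
      (by omega) (by omega) hmmin
    intro k hk
    rw [feas_iff sa sb hsa' hsb' k hk]
    omega
  simp only [hA, hB]
  omega
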